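-- pv_equiv track=rewrite | github.com/carololiveira6/fp-cederj | FP/ADs 2019-2/AD1/Resolução/Questão 6.py | orderna_por_soma_das_linha
-- ===== SOURCE A (Python) =====
-- from typing import List                                                                  # Importa o comando list de typing
--
-- def orderna_por_soma_das_linha(matriz: List[List[int]]) -> List[List[int]]:
--     soma_da_linha = []
--     for i, linha in enumerate(matriz):
--         dados = (sum(linha), i, linha)
--         soma_da_linha.append(dados)
--     linhas_ordenadas = []
--     for _, _, linha in ordenar(soma_da_linha):
--         linhas_ordenadas.append(linha)
--     return linhas_ordenadas
--
-- def ordenar(lista):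
--     tamanho = len(lista)
--     if tamanho <= 1:
--         return lista
--     central = tamanho // 2
--     pivo = lista[central]
--     menores_ou_iguais_ao_pivo = []
--     maiores_que_o_pivo = []
--     elementos_a_esquerda_do_pivo = lista[:central]
--     elementos_a_direita_do_pivo = lista[central + 1:]
--     for n in elementos_a_esquerda_do_pivo + elementos_a_direita_do_pivo:
--         if n <= pivo:
--             menores_ou_iguais_ao_pivo.append(n)
--         else:
--             maiores_que_o_pivo.append(n)
--     return ordenar(menores_ou_iguais_ao_pivo) + [pivo] + ordenar(maiores_que_o_pivo)
-- ===== SOURCE B (Python) =====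
-- from typing import List
--
-- def orderna_por_soma_das_linha(matriz: List[List[int]]) -> List[List[int]]:
--     # insertion sort on (row sum, index) keys instead of recursive quicksort
--     chaves = [(sum(linha), i, linha) for i, linha in enumerate(matriz)]
--     ordenado = []
--     for t in chaves:
--         j = 0
--         while j < len(ordenado) and (ordenado[j][0], ordenado[j][1]) <= (t[0], t[1]):
--             j += 1
--         ordenado.insert(j, t)
--     return [t[2] for t in ordenado]
-- ===== Notes on version B (the rewrite author's own statement) =====
-- stated objective: alternative
-- what changed: A's recursive quicksort helper over (sum, index, row) tuples is replaced by an iterative insertion sort that inserts each keyed row into a growing sorted list, comparing only the (sum, index) key.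
import Mathlib
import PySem

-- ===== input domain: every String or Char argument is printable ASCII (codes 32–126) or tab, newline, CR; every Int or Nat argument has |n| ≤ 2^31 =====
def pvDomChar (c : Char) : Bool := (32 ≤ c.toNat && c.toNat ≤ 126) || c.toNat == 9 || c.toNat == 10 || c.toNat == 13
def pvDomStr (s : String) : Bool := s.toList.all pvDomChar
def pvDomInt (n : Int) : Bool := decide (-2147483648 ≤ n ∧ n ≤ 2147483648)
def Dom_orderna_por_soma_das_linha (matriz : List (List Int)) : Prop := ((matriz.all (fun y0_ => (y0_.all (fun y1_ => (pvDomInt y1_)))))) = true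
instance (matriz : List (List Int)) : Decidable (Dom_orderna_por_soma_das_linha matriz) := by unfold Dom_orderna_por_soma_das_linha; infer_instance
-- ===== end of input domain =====

-- B replaces A's recursive quicksort helper by an iterative insertion sort on the (row sum, index) key; return values proved equal.

-- ===== PORT A =====
-- Python list <= (lexicographic), used by tuple comparison 'n <= pivo' on the third component
def pvListLe : List Int → List Int → Bool
  | [], _ => true
  | _ :: _, [] => false
  | a :: as, b :: bs => if a < b then true else if b < a then false else pvListLe as bs

-- Python tuple comparison '(soma, i, linha) <= (soma, i, linha)' (lexicographic; exact)
def pvTripLe (a b : Int × Int × List Int) : Bool :=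
  if a.1 < b.1 then true else if b.1 < a.1 then false
  else if a.2.1 < b.2.1 then true else if b.2.1 < a.2.1 then false
  else pvListLe a.2.2 b.2.2

-- the partition loop of 'ordenar' (append to one of the two accumulators)
def pvParticiona {α : Type} (p : α → Bool) (xs : List α) : List α × List α :=
  xs.foldl (fun acc n => if p n then (acc.1 ++ [n], acc.2) else (acc.1, acc.2 ++ [n])) ([], [])

theorem pvParticiona_foldl {α : Type} (p : α → Bool) (xs : List α) (a b : List α) :
    xs.foldl (fun acc n => if p n then (acc.1 ++ [n], acc.2) else (acc.1, acc.2 ++ [n])) (a, b)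
      = (a ++ xs.filter p, b ++ xs.filter (fun n => !p n)) := by
  induction xs generalizing a b with
  | nil => simp
  | cons x xs ih => by_cases h : p x <;> simp [h, ih]

theorem pvParticiona_eq {α : Type} (p : α → Bool) (xs : List α) :
    pvParticiona p xs = (xs.filter p, xs.filter (fun n => !p n)) := by
  simpa using pvParticiona_foldl p xs [] []

def ordenar (lista : List (Int × Int × List Int)) : List (Int × Int × List Int) :=
  if h : lista.length ≤ 1 then lista
  else
    match PySem.List.pyGet? lista ((lista.length / 2 : Nat) : Int) with
    | none => lista  -- unreachable: the index length/2 is in range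
    | some pivo =>
      ordenar (pvParticiona (fun n => pvTripLe n pivo)
          (PySem.List.slice lista none (some ((lista.length / 2 : Nat) : Int)) ++
           PySem.List.slice lista (some (((lista.length / 2 : Nat) : Int) + 1)) none)).1
      ++ [pivo] ++
      ordenar (pvParticiona (fun n => pvTripLe n pivo)
          (PySem.List.slice lista none (some ((lista.length / 2 : Nat) : Int)) ++
           PySem.List.slice lista (some (((lista.length / 2 : Nat) : Int) + 1)) none)).2
termination_by lista.length
decreasing_by
  all_goals
    have hcast : ((lista.length / 2 : Nat) : Int) + 1 = ((lista.length / 2 + 1 : Nat) : Int) := by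
      push_cast; ring
    rw [hcast, pvParticiona_eq]
    simp only [PySem.List.slice_to_natCast, PySem.List.slice_from_natCast]
    refine lt_of_le_of_lt (List.length_filter_le _ _) ?_
    simp only [List.length_append, List.length_take, List.length_drop]
    omega

def orderna_por_soma_das_linha (matriz : List (List Int)) : List (List Int) :=
  let soma_da_linha := (PySem.List.enumerate matriz 0).foldl
    (fun acc il => acc ++ [(il.2.sum, il.1, il.2)]) []
  (ordenar soma_da_linha).foldl (fun acc t => acc ++ [t.2.2]) []

-- ===== PORT B =====
-- Python tuple comparison on the two-component key '(soma, i) <= (soma, i)'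
def pvKeyLe (a b : Int × Int) : Bool := a.1 < b.1 || (a.1 == b.1 && a.2 ≤ b.2)

-- the inner while loop of B: skip the prefix of keys <= t's key, insert t there
def pvInsere (t : Int × Int × List Int) :
    List (Int × Int × List Int) → List (Int × Int × List Int)
  | [] => [t]
  | y :: ys => if pvKeyLe (y.1, y.2.1) (t.1, t.2.1) then y :: pvInsere t ys else t :: y :: ys

def orderna_por_soma_das_linha_alt (matriz : List (List Int)) : List (List Int) :=
  let chaves := (PySem.List.enumerate matriz 0).map (fun il => (il.2.sum, il.1, il.2))
  let ordenado := chaves.foldl (fun acc t => pvInsere t acc) []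
  ordenado.map (fun t => t.2.2)

-- ===== PRECONDITION & SPEC =====
def Spec_orderna_por_soma_das_linha (matriz : List (List Int)) (out : List (List Int)) : Prop := out = orderna_por_soma_das_linha_alt matriz
instance (matriz : List (List Int)) (out : List (List Int)) : Decidable (Spec_orderna_por_soma_das_linha matriz out) := by unfold Spec_orderna_por_soma_das_linha; infer_instance

-- ===== CLAIM (what is proved, stated in full; the proofs are below) =====
def Claim_equal_orderna_por_soma_das_linha : Prop := ∀ (matriz : List (List Int)), Dom_orderna_por_soma_das_linha matriz → Spec_orderna_por_soma_das_linha matriz (orderna_por_soma_das_linha matriz)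

-- ===== LEMMAS AND PROOFS =====

-- strict lexicographic order on the (sum, index) key
def pvLt (a b : Int × Int × List Int) : Prop := a.1 < b.1 ∨ (a.1 = b.1 ∧ a.2.1 < b.2.1)

-- distinct-index relation (symmetric)
def pvNe (a b : Int × Int × List Int) : Prop := a.2.1 ≠ b.2.1

theorem pvTripLe_true_iff {a b : Int × Int × List Int} (h : pvNe a b) :
    pvTripLe a b = true ↔ pvLt a b := by
  unfold pvTripLe pvLt pvNe at *
  split_ifs <;> simp_all <;> omega

theorem pvTripLe_false_iff {a b : Int × Int × List Int} (h : pvNe a b) :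
    pvTripLe a b = false ↔ pvLt b a := by
  unfold pvTripLe pvLt pvNe at *
  split_ifs <;> simp_all <;> omega

theorem pvKeyLe_true_iff {a b : Int × Int × List Int} (h : pvNe a b) :
    pvKeyLe (a.1, a.2.1) (b.1, b.2.1) = true ↔ pvLt a b := by
  unfold pvKeyLe pvLt pvNe at *
  simp only [decide_eq_true_eq, Bool.or_eq_true, Bool.and_eq_true, beq_iff_eq]
  constructor <;> intro hh <;> rcases hh with h1 | h1 <;> simp_all <;> omega

theorem pvLt_trans {a b c : Int × Int × List Int} (h1 : pvLt a b) (h2 : pvLt b c) : pvLt a c := by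
  unfold pvLt at *; omega

theorem pvLt_asymm {a b : Int × Int × List Int} (h1 : pvLt a b) (h2 : pvLt b a) : False := by
  unfold pvLt at *; omega


-- shared facts about the recursive case of 'ordenar'
theorem pv_slices_eq (lista : List (Int × Int × List Int)) :
    PySem.List.slice lista none (some ((lista.length / 2 : Nat) : Int)) ++
      PySem.List.slice lista (some (((lista.length / 2 : Nat) : Int) + 1)) none
      = lista.take (lista.length / 2) ++ lista.drop (lista.length / 2 + 1) := by
  have hcast : ((lista.length / 2 : Nat) : Int) + 1 = ((lista.length / 2 + 1 : Nat) : Int) := by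
    push_cast; ring
  rw [PySem.List.slice_to_natCast, hcast, PySem.List.slice_from_natCast]

theorem pv_pivot_decomp (lista : List (Int × Int × List Int)) (pivo : Int × Int × List Int)
    (h : ¬ lista.length ≤ 1)
    (heq : PySem.List.pyGet? lista ((lista.length / 2 : Nat) : Int) = some pivo) :
    lista = lista.take (lista.length / 2) ++ pivo :: lista.drop (lista.length / 2 + 1) := by
  rw [PySem.List.pyGet?_natCast] at heq
  have hc : lista.length / 2 < lista.length := by omega
  have hp : pivo = lista[lista.length / 2] := by
    have := List.getElem?_eq_getElem (l := lista) (i := lista.length / 2) hc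
    rw [this] at heq; exact (Option.some_injective _ heq).symm
  subst hp
  conv_lhs => rw [← List.take_append_drop (lista.length / 2) lista]
  rw [← List.getElem_cons_drop]

theorem ordenar_perm (lista : List (Int × Int × List Int)) : (ordenar lista).Perm lista := by
  induction lista using ordenar.induct with
  | case1 lista h => rw [ordenar, dif_pos h]
  | case2 lista h heq =>
    rw [ordenar, dif_neg h, heq]
  | case3 lista h pivo heq ih1 ih2 =>
    rw [ordenar, dif_neg h, heq]
    rw [pv_slices_eq lista] at ih1 ih2 ⊢
    simp only [pvParticiona_eq] at ih1 ih2 ⊢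
    set X := lista.take (lista.length / 2) ++ lista.drop (lista.length / 2 + 1) with hX
    refine ((ih1.append (List.Perm.refl [pivo])).append ih2).trans ?_
    have h1 : (X.filter (fun n => pvTripLe n pivo) ++ [pivo] ++
        X.filter (fun n => !pvTripLe n pivo)).Perm (pivo :: X) := by
      rw [List.append_assoc, List.singleton_append]
      exact List.perm_middle.trans ((List.filter_append_perm _ X).cons pivo)
    refine h1.trans ?_
    conv_rhs => rw [pv_pivot_decomp lista pivo h heq]
    exact List.perm_middle.symm

theorem ordenar_sorted (lista : List (Int × Int × List Int)) (h : lista.Pairwise pvNe) :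
    (ordenar lista).Pairwise pvLt := by
  induction lista using ordenar.induct with
  | case1 lista hlen =>
    rw [ordenar, dif_pos hlen]
    rcases lista with _ | ⟨x, _ | ⟨y, ys⟩⟩
    · exact List.Pairwise.nil
    · exact List.pairwise_singleton _ _
    · simp at hlen
  | case2 lista hlen heq =>
    rw [PySem.List.pyGet?_natCast] at heq
    have hc : lista.length / 2 < lista.length := by omega
    simp [List.getElem?_eq_getElem hc] at heq
  | case3 lista hlen pivo heq ih1 ih2 =>
    rw [ordenar, dif_neg hlen, heq]
    rw [pv_slices_eq lista] at ih1 ih2 ⊢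
    simp only [pvParticiona_eq] at ih1 ih2 ⊢
    set X := lista.take (lista.length / 2) ++ lista.drop (lista.length / 2 + 1) with hX
    have hdec := pv_pivot_decomp lista pivo hlen heq
    have hXsub : X.Sublist lista := by
      conv_rhs => rw [hdec]
      exact (List.sublist_cons_self pivo _).append_left _
    have hXne : X.Pairwise pvNe := h.sublist hXsub
    -- every element of X has an index different from pivo's
    have hneP : ∀ x ∈ X, pvNe x pivo := by
      rw [hdec, List.pairwise_append] at h
      intro x hx
      rcases List.mem_append.mp hx with hx | hx
      · exact h.2.2 x hx pivo (by simp)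
      · have := (List.pairwise_cons.mp h.2.1).1 x hx
        unfold pvNe at this ⊢; omega
    have hm : ∀ x ∈ X.filter (fun n => pvTripLe n pivo), pvLt x pivo := by
      intro x hx
      rcases List.mem_filter.mp hx with ⟨hxX, hxp⟩
      exact (pvTripLe_true_iff (hneP x hxX)).mp hxp
    have hg : ∀ y ∈ X.filter (fun n => !pvTripLe n pivo), pvLt pivo y := by
      intro y hy
      rcases List.mem_filter.mp hy with ⟨hyX, hyp⟩
      exact (pvTripLe_false_iff (hneP y hyX)).mp (by simpa using hyp)
    have ihm := ih1 (hXne.sublist List.filter_sublist)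
    have ihg := ih2 (hXne.sublist List.filter_sublist)
    rw [List.append_assoc, List.singleton_append, List.pairwise_append]
    refine ⟨ihm, List.pairwise_cons.mpr ⟨?_, ihg⟩, ?_⟩
    · intro y hy
      exact hg y ((ordenar_perm _).mem_iff.mp hy)
    · intro a ha b hb
      have ham := hm a ((ordenar_perm _).mem_iff.mp ha)
      rcases List.mem_cons.mp hb with rfl | hb'
      · exact ham
      · exact pvLt_trans ham (hg b ((ordenar_perm _).mem_iff.mp hb'))

theorem pvInsere_perm (t : Int × Int × List Int) (l : List (Int × Int × List Int)) :
    (pvInsere t l).Perm (t :: l) := by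
  induction l with
  | nil => rfl
  | cons y ys ih =>
    unfold pvInsere
    split
    · exact ((ih.cons y).trans (List.Perm.swap t y ys))
    · exact List.Perm.refl _

theorem pvInsere_sorted (t : Int × Int × List Int) (l : List (Int × Int × List Int))
    (hne : ∀ y ∈ l, pvNe y t) (hs : l.Pairwise pvLt) : (pvInsere t l).Pairwise pvLt := by
  induction l with
  | nil => simp [pvInsere]
  | cons y ys ih =>
    rw [List.pairwise_cons] at hs
    unfold pvInsere
    split
    · rename_i hle
      have hyt : pvLt y t := (pvKeyLe_true_iff (hne y (by simp))).mp hle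
      refine List.pairwise_cons.mpr ⟨?_, ih (fun z hz => hne z (by simp [hz])) hs.2⟩
      intro z hz
      rcases List.mem_cons.mp ((pvInsere_perm t ys).mem_iff.mp hz) with rfl | hz'
      · exact hyt
      · exact hs.1 z hz'
    · rename_i hle
      have hty : pvLt t y := by
        have h' := (pvKeyLe_true_iff (hne y (by simp)))
        have : ¬ pvLt y t := fun hc => hle (h'.mpr hc)
        have hne' := hne y (by simp)
        unfold pvLt pvNe at *
        omega
      refine List.pairwise_cons.mpr ⟨?_, List.pairwise_cons.mpr ⟨hs.1, hs.2⟩⟩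
      intro z hz
      rcases List.mem_cons.mp hz with rfl | hz'
      · exact hty
      · exact pvLt_trans hty (hs.1 z hz')

theorem foldl_insere_perm (rest acc : List (Int × Int × List Int)) :
    (rest.foldl (fun acc t => pvInsere t acc) acc).Perm (acc ++ rest) := by
  induction rest generalizing acc with
  | nil => simp
  | cons t rest ih =>
    simp only [List.foldl_cons]
    refine (ih (pvInsere t acc)).trans ?_
    have h1 : (pvInsere t acc ++ rest).Perm ((t :: acc) ++ rest) :=
      (pvInsere_perm t acc).append_right rest
    exact h1.trans (by simpa using (List.perm_middle (a := t) (l₁ := acc) (l₂ := rest)).symm)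

theorem foldl_insere_sorted (rest acc : List (Int × Int × List Int))
    (hacc : acc.Pairwise pvLt)
    (hne : ∀ t ∈ rest, ∀ y ∈ acc, pvNe y t)
    (hrest : rest.Pairwise pvNe) :
    (rest.foldl (fun acc t => pvInsere t acc) acc).Pairwise pvLt := by
  induction rest generalizing acc with
  | nil => simpa
  | cons t rest ih =>
    rw [List.pairwise_cons] at hrest
    simp only [List.foldl_cons]
    refine ih (pvInsere t acc) (pvInsere_sorted t acc (fun y hy => hne t (by simp) y hy) hacc)
      ?_ hrest.2
    intro t' ht' y hy
    rcases List.mem_cons.mp ((pvInsere_perm t acc).mem_iff.mp hy) with rfl | hy'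
    · exact hrest.1 t' ht'
    · exact hne t' (by simp [ht']) y hy'

theorem foldl_append_singleton {α β : Type} (f : α → β) (xs : List α) (a : List β) :
    xs.foldl (fun acc x => acc ++ [f x]) a = a ++ xs.map f := by
  induction xs generalizing a with
  | nil => simp
  | cons x xs ih => simp [ih]

theorem keyed_pairwise_ne (matriz : List (List Int)) :
    ((PySem.List.enumerate matriz 0).map (fun il => (il.2.sum, il.1, il.2))).Pairwise pvNe := by
  refine List.Pairwise.map _ ?_ (PySem.List.pairwise_lt_enumerate (xs := matriz) (s := 0))
  intro a b hab
  unfold pvNe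
  simp only
  omega

-- ===== VERDICT (by name: the statement is the Claim_ definition above) =====
theorem orderna_por_soma_das_linha_spec : Claim_equal_orderna_por_soma_das_linha := by
  intro matriz _
  unfold Spec_orderna_por_soma_das_linha orderna_por_soma_das_linha orderna_por_soma_das_linha_alt
  simp only [foldl_append_singleton]
  set K := (PySem.List.enumerate matriz 0).map (fun il => (il.2.sum, il.1, il.2)) with hK
  have hKne := keyed_pairwise_ne matriz
  have hA : (ordenar K).Perm K := ordenar_perm K
  have hB : (K.foldl (fun acc t => pvInsere t acc) []).Perm K := by
    simpa using foldl_insere_perm K []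
  have hAs := ordenar_sorted K hKne
  have hBs := foldl_insere_sorted K [] (by simp) (by simp) hKne
  have : ordenar K = K.foldl (fun acc t => pvInsere t acc) [] :=
    (hA.trans hB.symm).eq_of_pairwise
      (fun _ _ _ _ h1 h2 => (pvLt_asymm h1 h2).elim) hAs hBs
  simp [this]
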